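-- pv_equiv track=rewrite | github.com/tenseleyFlow/DocumentLanguageModel | src/dlm/data/weighted_rows.py | weight_distribution
-- ===== SOURCE A (Python) =====
-- from collections.abc import Mapping, Sequence
-- from typing import Any
--
-- Row = dict[str, Any]
--
-- def weight_distribution(
--     rows: Sequence[Row],
-- ) -> dict[str, dict[str, int]]:
--     """Count original rows per `(tag_key, tag_value)` for summary reporting.
--
--     Takes the pre-expansion row list so users can audit how many rows
--     were candidates for each rule, independent of how many copies
--     the expansion produced.
--     """
--     dist: dict[str, dict[str, int]] = {}
--     for row in rows:
--         row_tags = row.get("_dlm_row_tags") or {}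
--         for tag_key, tag_value in row_tags.items():
--             inner = dist.setdefault(tag_key, {})
--             inner[tag_value] = inner.get(tag_value, 0) + 1
--     return dist
-- ===== SOURCE B (Python) =====
-- def weight_distribution(rows):
--     """Count original rows per (tag_key, tag_value): flatten all tag pairs,
--     group values by tag key, then tally each key's value list."""
--     pairs = [item for row in rows for item in (row.get("_dlm_row_tags") or {}).items()]
--     groups = {}
--     for k, v in pairs:
--         groups.setdefault(k, []).append(v)
--     def tally(values):
--         counts = {}
--         for v in values:
--             counts[v] = counts.get(v, 0) + 1
--         return counts
--     return {k: tally(vs) for k, vs in groups.items()}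
-- ===== Notes on version B (the rewrite author's own statement) =====
-- stated objective: alternative
-- what changed: A counts with one fused pass updating a nested dict per tag pair; B flattens all (key, value) pairs, groups values by tag key in one pass, and then tallies each key's value list separately, assembling the nested dict with a comprehension.
import Mathlib
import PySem

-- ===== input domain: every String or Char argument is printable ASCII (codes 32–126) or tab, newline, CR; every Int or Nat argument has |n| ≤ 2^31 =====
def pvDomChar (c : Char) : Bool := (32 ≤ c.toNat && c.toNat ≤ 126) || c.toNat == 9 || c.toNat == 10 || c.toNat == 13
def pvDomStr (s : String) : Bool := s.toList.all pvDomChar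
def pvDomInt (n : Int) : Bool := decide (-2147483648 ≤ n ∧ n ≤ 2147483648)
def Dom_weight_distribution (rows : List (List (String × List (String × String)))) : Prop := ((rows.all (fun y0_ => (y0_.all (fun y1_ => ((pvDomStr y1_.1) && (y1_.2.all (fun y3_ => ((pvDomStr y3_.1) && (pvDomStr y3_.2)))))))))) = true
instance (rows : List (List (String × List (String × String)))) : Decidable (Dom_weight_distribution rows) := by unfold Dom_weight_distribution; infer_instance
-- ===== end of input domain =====

-- B replaces A's fused nested-dict pass by flatten → group-by-key → per-key tally (alternative decomposition, same cost).
-- Python dict operations are ported as first-match association-list updates preserving insertion order (exact for Python dicts).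


-- ===== PORT A =====
-- row.get("_dlm_row_tags") or {} : first-match lookup, default empty
def wdTagsA (row : List (String × List (String × String))) : List (String × String) :=
  (((row.find? (fun q => q.1 == "_dlm_row_tags")).map Prod.snd).getD [])

-- inner[tag_value] = inner.get(tag_value, 0) + 1  (overwrite in place, else append)
def wdInner (inner : List (String × Int)) (v : String) : List (String × Int) :=
  match inner with
  | [] => [(v, 1)]
  | (w, m) :: t => if w = v then (w, m + 1) :: t else (w, m) :: wdInner t v

-- dist.setdefault(tag_key, {}) followed by the in-place update of that inner dict
def wdBump (dist : List (String × List (String × Int))) (k v : String) :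
    List (String × List (String × Int)) :=
  match dist with
  | [] => [(k, [(v, 1)])]
  | (k', inner) :: t =>
      if k' = k then (k', wdInner inner v) :: t else (k', inner) :: wdBump t k v

def weight_distribution (rows : List (List (String × List (String × String)))) :
    List (String × List (String × Int)) :=
  rows.foldl (fun dist row => (wdTagsA row).foldl (fun d p => wdBump d p.1 p.2) dist) []

-- ===== PORT B =====
def wdTagsB (row : List (String × List (String × String))) : List (String × String) :=
  (((row.find? (fun q => q.1 == "_dlm_row_tags")).map Prod.snd).getD [])

-- groups.setdefault(k, []).append(v)
def wdGroupAdd (g : List (String × List String)) (k v : String) : List (String × List String) :=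
  match g with
  | [] => [(k, [v])]
  | (k', vs) :: t => if k' = k then (k', vs ++ [v]) :: t else (k', vs) :: wdGroupAdd t k v

-- counts[v] = counts.get(v, 0) + 1
def wdCntAdd (c : List (String × Int)) (v : String) : List (String × Int) :=
  match c with
  | [] => [(v, 1)]
  | (w, m) :: t => if w = v then (w, m + 1) :: t else (w, m) :: wdCntAdd t v

def wdTally (vs : List String) : List (String × Int) :=
  vs.foldl wdCntAdd []

def weight_distribution_alt (rows : List (List (String × List (String × String)))) :
    List (String × List (String × Int)) :=
  let pairs := rows.flatMap (fun row => wdTagsB row)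
  let groups := pairs.foldl (fun g p => wdGroupAdd g p.1 p.2) []
  groups.map (fun q => (q.1, wdTally q.2))

-- ===== PRECONDITION & SPEC =====
def Spec_weight_distribution (rows : List (List (String × List (String × String)))) (out : List (String × List (String × Int))) : Prop := out = weight_distribution_alt rows
instance (rows : List (List (String × List (String × String)))) (out : List (String × List (String × Int))) : Decidable (Spec_weight_distribution rows out) := by unfold Spec_weight_distribution; infer_instance

-- ===== CLAIM (what is proved, stated in full; the proofs are below) =====
def Claim_equal_weight_distribution : Prop := ∀ (rows : List (List (String × List (String × String)))), Dom_weight_distribution rows → Spec_weight_distribution rows (weight_distribution rows)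

-- ===== LEMMAS AND PROOFS =====

-- A's two nested loops are the single loop over the flattened pair list
theorem wd_foldA_flatten (rows : List (List (String × List (String × String))))
    (init : List (String × List (String × Int))) :
    rows.foldl (fun dist row => (wdTagsA row).foldl (fun d p => wdBump d p.1 p.2) dist) init
      = (rows.flatMap (fun row => wdTagsA row)).foldl (fun d p => wdBump d p.1 p.2) init := by
  induction rows generalizing init with
  | nil => rfl
  | cons r t ih => simp [List.flatMap_cons, List.foldl_append, ih]

theorem wdInner_eq_wdCntAdd (c : List (String × Int)) (v : String) :
    wdInner c v = wdCntAdd c v := by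
  induction c with
  | nil => rfl
  | cons h t ih => simp [wdInner, wdCntAdd, ih]

theorem wdTally_append (vs : List String) (v : String) :
    wdTally (vs ++ [v]) = wdCntAdd (wdTally vs) v := by
  simp [wdTally, List.foldl_append]

-- one step: bumping the tallied view is tallying the grouped view after adding the pair
theorem wdBump_map_tally (g : List (String × List String)) (k v : String) :
    wdBump (g.map (fun q => (q.1, wdTally q.2))) k v
      = (wdGroupAdd g k v).map (fun q => (q.1, wdTally q.2)) := by
  induction g with
  | nil => simp [wdBump, wdGroupAdd, wdTally, wdCntAdd]
  | cons h t ih =>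
      by_cases hk : h.1 = k
      · simp [wdBump, wdGroupAdd, hk, wdInner_eq_wdCntAdd, wdTally_append]
      · simp [wdBump, wdGroupAdd, hk, ih]

-- whole loop: A's fused fold over pairs equals tallying B's groups
theorem wd_fold_eq (ps : List (String × String)) (g : List (String × List String)) :
    ps.foldl (fun d p => wdBump d p.1 p.2) (g.map (fun q => (q.1, wdTally q.2)))
      = (ps.foldl (fun g' p => wdGroupAdd g' p.1 p.2) g).map (fun q => (q.1, wdTally q.2)) := by
  induction ps generalizing g with
  | nil => rfl
  | cons p t ih => simpa [wdBump_map_tally] using ih (wdGroupAdd g p.1 p.2)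

-- ===== VERDICT (by name: the statement is the Claim_ definition above) =====
theorem weight_distribution_spec : Claim_equal_weight_distribution := by
  intro rows _
  show weight_distribution rows = weight_distribution_alt rows
  have hflat : rows.flatMap (fun row => wdTagsA row) = rows.flatMap (fun row => wdTagsB row) := rfl
  simpa [weight_distribution, weight_distribution_alt, wd_foldA_flatten, hflat] using
    wd_fold_eq (rows.flatMap (fun row => wdTagsB row)) []
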